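-- pv_equiv track=rewrite | github.com/utwente-energy/demkit | components/opt/optAlg.py | continuousBufferPlanningPrices
-- ===== SOURCE A (Python) =====
-- def continuousBufferPlanningPrices(chargeRequired, powerMax, powerLimitsUpper, prices):
-- 	assert (prices != None)
-- 	result = [0] * len(prices)
--
-- 	powerLimits = [powerMax] * len(prices)
-- 	if len(powerLimitsUpper) == len(prices):
-- 		for i in range(0, len(prices)):
-- 			powerLimits[i] = min(powerLimitsUpper[i], powerMax)
--
--
-- 	# Here comes the sorting
-- 	sorted = []
-- 	idx = 0
-- 	for val in prices:
-- 		sorted.append([val.real, idx])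
-- 		idx += 1
-- 	sorted.sort()
--
-- 	remainingCharge = chargeRequired
-- 	i = 0
-- 	while remainingCharge > 0 and i < len(prices):
-- 		if remainingCharge > powerLimits[sorted[i][1]]:
-- 			result[sorted[i][1]] = powerLimits[sorted[i][1]]
-- 			remainingCharge -= powerLimits[sorted[i][1]]
-- 			i += 1
-- 		else:
-- 			result[sorted[i][1]] = remainingCharge
-- 			remainingCharge = 0
--
-- 	assert (len(result) == len(prices))
-- 	return result
-- ===== SOURCE B (Python) =====
-- def continuousBufferPlanningPrices(chargeRequired, powerMax, powerLimitsUpper, prices):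
-- 	assert (prices != None)
-- 	n = len(prices)
-- 	if len(powerLimitsUpper) == n:
-- 		limits = [min(u, powerMax) for u in powerLimitsUpper]
-- 	else:
-- 		limits = [powerMax] * n
--
-- 	# Selection without sorting: repeatedly pick the cheapest remaining slot
-- 	# (ties broken by lowest index, like a stable sort) and allocate to it,
-- 	# stopping as soon as the required charge is covered.
-- 	result = [0] * n
-- 	avail = list(range(n))
-- 	remaining = chargeRequired
-- 	while remaining > 0 and avail:
-- 		m = avail[0]
-- 		for j in avail[1:]:
-- 			if (prices[j].real, j) < (prices[m].real, m):
-- 				m = j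
-- 		give = min(remaining, limits[m])
-- 		result[m] = give
-- 		remaining -= give
-- 		avail = [j for j in avail if j != m]
-- 	return result
-- ===== Notes on version B (the rewrite author's own statement) =====
-- stated objective: alternative
-- what changed: B never sorts: instead of building and sorting a [price, idx] pair list and walking it, it keeps a shrinking list of available slot indices and repeatedly selects the cheapest remaining slot by a linear scan (ties to the lowest index), allocating min(remaining, limit) to it until the charge is covered; limits are capped by a comprehension instead of an index-setting loop.
import Mathlib
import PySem

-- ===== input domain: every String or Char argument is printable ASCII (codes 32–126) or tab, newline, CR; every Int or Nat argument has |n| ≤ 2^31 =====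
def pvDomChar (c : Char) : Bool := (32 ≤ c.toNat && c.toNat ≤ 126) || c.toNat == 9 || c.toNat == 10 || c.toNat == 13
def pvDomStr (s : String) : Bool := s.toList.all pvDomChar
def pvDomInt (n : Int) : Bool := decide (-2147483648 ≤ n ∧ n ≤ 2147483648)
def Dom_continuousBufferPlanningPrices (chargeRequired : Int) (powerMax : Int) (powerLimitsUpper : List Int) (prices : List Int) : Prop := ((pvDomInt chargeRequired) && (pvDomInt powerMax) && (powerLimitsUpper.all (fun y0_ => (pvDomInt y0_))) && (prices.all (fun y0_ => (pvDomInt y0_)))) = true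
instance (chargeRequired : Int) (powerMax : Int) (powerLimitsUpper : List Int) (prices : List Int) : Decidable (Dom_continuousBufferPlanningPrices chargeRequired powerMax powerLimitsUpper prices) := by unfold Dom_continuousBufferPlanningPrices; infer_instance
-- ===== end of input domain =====

-- B drops A's build-and-sort of a [price, idx] pair list entirely: it keeps a shrinking list of
-- available slot indices and repeatedly selects the cheapest remaining slot by a linear scan,
-- allocating until the charge is covered (objective: alternative).

-- ===== PORT A =====
-- the while loop of A: walks the sorted [price, idx] pairs with remaining charge and the result list
def pvAWhile (powerLimits : List Int) : List (Int × Int) → Int → List Int → List Int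
  | [], _, result => result
  | p :: rest, remainingCharge, result =>
    if remainingCharge > 0 then
      if remainingCharge > PySem.List.pyGetD powerLimits p.2 0 then
        pvAWhile powerLimits rest (remainingCharge - PySem.List.pyGetD powerLimits p.2 0)
          (PySem.List.pySetD result p.2 (PySem.List.pyGetD powerLimits p.2 0))
      else
        PySem.List.pySetD result p.2 remainingCharge
    else
      result

def continuousBufferPlanningPrices (chargeRequired : Int) (powerMax : Int) (powerLimitsUpper : List Int) (prices : List Int) : List Int :=
  let result := List.replicate prices.length (0 : Int)
  let powerLimits := List.replicate prices.length powerMax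
  let powerLimits :=
    if powerLimitsUpper.length = prices.length then
      (PySem.List.pyRange 0 prices.length 1).foldl
        (fun pl i => PySem.List.pySetD pl i (min (PySem.List.pyGetD powerLimitsUpper i 0) powerMax)) powerLimits
    else powerLimits
  -- sorted = []; for val in prices: sorted.append([val.real, idx]); idx += 1; sorted.sort()
  let pairs := (prices.foldl (fun (a : List (Int × Int) × Int) val => (a.1 ++ [(val, a.2)], a.2 + 1)) ([], 0)).1
  let sortedPairs := PySem.List.sorted2 pairs (fun p => p.1) (fun p => p.2)
  pvAWhile powerLimits sortedPairs chargeRequired result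

-- ===== PORT B =====
-- the tuple comparison (prices[j].real, j) < (prices[m].real, m) of B's inner scan
def pvPairLt (prices : List Int) (j m : Int) : Bool :=
  decide (PySem.List.pyGetD prices j 0 < PySem.List.pyGetD prices m 0) ||
  (decide (PySem.List.pyGetD prices j 0 = PySem.List.pyGetD prices m 0) && decide (j < m))

-- B's inner for-loop: m = avail[0]; for j in avail[1:]: if (prices[j], j) < (prices[m], m): m = j
def pvSelMin (prices : List Int) (a : Int) (rest : List Int) : Int :=
  rest.foldl (fun m j => if pvPairLt prices j m then j else m) a

-- (termination helper for pvSelLoop: the selected slot is one of the available ones)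
theorem pvSelMin_mem (prices : List Int) (rest : List Int) : ∀ a : Int, pvSelMin prices a rest ∈ a :: rest := by
  induction rest with
  | nil => intro a; simp [pvSelMin]
  | cons j t ih =>
    intro a
    simp only [pvSelMin, List.foldl_cons]
    have h := ih (if pvPairLt prices j a then j else a)
    simp only [pvSelMin] at h
    by_cases hp : pvPairLt prices j a <;> simp [hp] at h ⊢ <;> tauto

-- B's outer while-loop over the shrinking avail list
def pvSelLoop (prices limits : List Int) : List Int → Int → List Int → List Int
  | [], _, result => result
  | a :: rest, remaining, result =>
    if remaining > 0 then
      let m := pvSelMin prices a rest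
      let give := min remaining (PySem.List.pyGetD limits m 0)
      pvSelLoop prices limits ((a :: rest).filter (fun j => j ≠ m)) (remaining - give)
        (PySem.List.pySetD result m give)
    else result
termination_by avail => avail.length
decreasing_by
  have hm := pvSelMin_mem prices rest a
  exact List.length_filter_lt_length_iff_exists.mpr ⟨pvSelMin prices a rest, hm, by simp⟩

def continuousBufferPlanningPrices_alt (chargeRequired : Int) (powerMax : Int) (powerLimitsUpper : List Int) (prices : List Int) : List Int :=
  let n := prices.length
  let limits := if powerLimitsUpper.length = n then powerLimitsUpper.map (fun u => min u powerMax)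
                else List.replicate n powerMax
  pvSelLoop prices limits (PySem.List.pyRange 0 n 1) chargeRequired (List.replicate n (0 : Int))

-- ===== PRECONDITION & SPEC =====
def Spec_continuousBufferPlanningPrices (chargeRequired : Int) (powerMax : Int) (powerLimitsUpper : List Int) (prices : List Int) (out : List Int) : Prop := out = continuousBufferPlanningPrices_alt chargeRequired powerMax powerLimitsUpper prices
instance (chargeRequired : Int) (powerMax : Int) (powerLimitsUpper : List Int) (prices : List Int) (out : List Int) : Decidable (Spec_continuousBufferPlanningPrices chargeRequired powerMax powerLimitsUpper prices out) := by unfold Spec_continuousBufferPlanningPrices; infer_instance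

-- ===== CLAIM (what is proved, stated in full; the proofs are below) =====
def Claim_equal_continuousBufferPlanningPrices : Prop := ∀ (chargeRequired : Int) (powerMax : Int) (powerLimitsUpper : List Int) (prices : List Int), Dom_continuousBufferPlanningPrices chargeRequired powerMax powerLimitsUpper prices → Spec_continuousBufferPlanningPrices chargeRequired powerMax powerLimitsUpper prices (continuousBufferPlanningPrices chargeRequired powerMax powerLimitsUpper prices)

-- ===== LEMMAS AND PROOFS =====

theorem pvGetD_nonneg (xs : List Int) (j : Int) (h : 0 ≤ j) :
    PySem.List.pyGetD xs j 0 = xs.getD j.toNat 0 := by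
  have hj : j = (j.toNat : Int) := by omega
  rw [hj, PySem.List.pyGetD_natCast, Int.toNat_natCast]

theorem pvGetD_set (xs : List Int) (i : Int) (h0 : 0 ≤ i) (hl : i < (xs.length : Int)) (v : Int) (j : Nat) :
    (xs.set i.toNat v).getD j 0 = if (j : Int) = i then v else xs.getD j 0 := by
  by_cases hji : (j : Int) = i
  · have hj : j = i.toNat := by omega
    have hlt : i.toNat < xs.length := by omega
    subst hj
    simp [List.getD_eq_getElem?_getD, hji, hlt]
  · have hne : i.toNat ≠ j := by omega
    simp [List.getD_eq_getElem?_getD, hne, hji]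

-- A's append-with-counter loop builds enumerate with the components swapped
theorem pvPairsAux (xs : List Int) : ∀ (acc : List (Int × Int)) (k : Int),
    (xs.foldl (fun (a : List (Int × Int) × Int) val => (a.1 ++ [(val, a.2)], a.2 + 1)) (acc, k)).1
      = acc ++ (PySem.List.enumerate xs k).map (fun p => (p.2, p.1)) := by
  induction xs with
  | nil => intro acc k; simp [PySem.List.enumerate_nil]
  | cons v t ih =>
    intro acc k
    simp only [List.foldl_cons, PySem.List.enumerate_cons, List.map_cons]
    rw [ih]
    simp

theorem pvInsertBy_map {β α : Type} (g : β → α) (before : α → α → Bool) (x : β) :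
    ∀ (ys : List β),
    PySem.List.insertBy before (g x) (ys.map g)
      = (PySem.List.insertBy (fun a b => before (g a) (g b)) x ys).map g := by
  intro ys
  induction ys with
  | nil => simp [PySem.List.insertBy]
  | cons y t ih =>
    simp only [List.map_cons, PySem.List.insertBy]
    by_cases h : before (g x) (g y)
    · simp [h]
    · simp [h, ih]

-- sorting a mapped list with pointwise-matching keys is mapping the sorted list
theorem pvSorted2_map {β α : Type} (g : β → α) (k1 : α → Int) (k2 : α → Int) (xs : List β) :
    PySem.List.sorted2 (xs.map g) k1 k2 false
      = (PySem.List.sorted2 xs (fun b => k1 (g b)) (fun b => k2 (g b)) false).map g := by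
  show (xs.map g).foldl (fun acc x => PySem.List.insertBy _ x acc) []
      = (xs.foldl (fun acc x => PySem.List.insertBy _ x acc) []).map g
  have main : ∀ (l : List β) (acc : List β),
      (l.map g).foldl (fun acc x => PySem.List.insertBy
          (fun a b => decide (k1 a < k1 b) || (!decide (k1 b < k1 a) && decide (k2 a < k2 b))) x acc) (acc.map g)
        = (l.foldl (fun acc x => PySem.List.insertBy
            (fun a b => decide (k1 (g a) < k1 (g b)) || (!decide (k1 (g b) < k1 (g a)) && decide (k2 (g a) < k2 (g b)))) x acc) acc).map g := by
    intro l
    induction l with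
    | nil => intro acc; simp
    | cons x t ih =>
      intro acc
      simp only [List.map_cons, List.foldl_cons]
      rw [pvInsertBy_map g _ x acc, ih]
  exact main xs []

-- folding index-sets over range 0..n rewrites exactly the first n entries
theorem pvFoldSet (f : Int → Int) : ∀ (n : Nat) (res : List Int), n ≤ res.length →
    ((PySem.List.pyRange 0 n 1).foldl (fun pl i => PySem.List.pySetD pl i (f i)) res).length = res.length
    ∧ ∀ j : Nat, ((PySem.List.pyRange 0 n 1).foldl (fun pl i => PySem.List.pySetD pl i (f i)) res).getD j 0
        = if j < n then f j else res.getD j 0 := by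
  intro n
  induction n with
  | zero => intro res _; simp
  | succ m ih =>
    intro res hlen
    have hsplit : PySem.List.pyRange 0 ((m : Nat) + 1 : Nat) 1
        = PySem.List.pyRange 0 m 1 ++ [(m : Int)] := by
      push_cast
      rw [PySem.List.pyRange_one_succ_right (by positivity)]
    obtain ⟨ihl, ihg⟩ := ih res (by omega)
    rw [hsplit, List.foldl_append]
    have hml : ((m : Int)) < (((PySem.List.pyRange 0 m 1).foldl (fun pl i => PySem.List.pySetD pl i (f i)) res).length : Int) := by
      rw [ihl]; omega
    constructor
    · simp only [List.foldl_cons, List.foldl_nil]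
      rw [PySem.List.pySetD_of_nonneg _ _ (by positivity), List.length_set, ihl]
    · intro j
      simp only [List.foldl_cons, List.foldl_nil]
      rw [PySem.List.pySetD_of_nonneg _ _ (by positivity),
        pvGetD_set _ _ (by positivity) hml, ihg]
      by_cases hjm : (j : Int) = (m : Int)
      · simp [hjm]; omega
      · have : j ≠ m := by omega
        by_cases hj : j < m
        · simp [hjm, hj]; omega
        · have : ¬ j < m + 1 := by omega
          simp [hjm, hj, this]

-- A's index-setting powerLimits loop computes B's capped comprehension
theorem pvLimitsEq (pLU : List Int) (pM : Int) :
    ∀ (n : Nat), pLU.length = n →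
    (PySem.List.pyRange 0 n 1).foldl
        (fun pl i => PySem.List.pySetD pl i (min (PySem.List.pyGetD pLU i 0) pM)) (List.replicate n pM)
      = pLU.map (fun u => min u pM) := by
  intro n hn
  obtain ⟨hl, hg⟩ := pvFoldSet (fun i => min (PySem.List.pyGetD pLU i 0) pM) n (List.replicate n pM) (by simp)
  apply List.ext_getElem
  · simp [hl, hn]
  · intro j hj1 hj2
    have hjn : j < n := by simpa [hl] using hj1
    have := hg j
    rw [if_pos hjn] at this
    rw [← List.getD_eq_getElem _ 0 hj1, this, pvGetD_nonneg _ _ (by positivity)]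
    simp only [Int.toNat_natCast]
    rw [List.getElem_map]
    rw [List.getD_eq_getElem _ 0 (by omega)]

-- the strict lexicographic order sorted2 inserts by, specialised to key j ↦ (prices[j], j)
def pvSLt (prices : List Int) (a b : Int) : Bool :=
  decide (PySem.List.pyGetD prices a 0 < PySem.List.pyGetD prices b 0) ||
  (!decide (PySem.List.pyGetD prices b 0 < PySem.List.pyGetD prices a 0) && decide (a < b))

theorem pvPairLt_eq_pvSLt (prices : List Int) (a b : Int) : pvPairLt prices a b = pvSLt prices a b := by
  rw [Bool.eq_iff_iff]
  simp only [pvPairLt, pvSLt, Bool.or_eq_true, Bool.and_eq_true, Bool.not_eq_eq_eq_not,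
    Bool.not_true, decide_eq_true_eq, decide_eq_false_iff_not]
  omega

theorem pvSLt_irrefl (prices : List Int) (a : Int) : pvSLt prices a a = false := by
  simp [pvSLt]

theorem pvSLt_trans (prices : List Int) {a b c : Int}
    (h1 : pvSLt prices a b = true) (h2 : pvSLt prices b c = true) : pvSLt prices a c = true := by
  simp only [pvSLt, Bool.or_eq_true, Bool.and_eq_true, Bool.not_eq_eq_eq_not, Bool.not_true,
    decide_eq_true_eq, decide_eq_false_iff_not] at *
  omega

theorem pvSLt_asymm (prices : List Int) {a b : Int}
    (h : pvSLt prices a b = true) : pvSLt prices b a = false := by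
  by_contra hc
  rw [Bool.not_eq_false] at hc
  simp only [pvSLt, Bool.or_eq_true, Bool.and_eq_true, Bool.not_eq_eq_eq_not, Bool.not_true,
    decide_eq_true_eq, decide_eq_false_iff_not] at h hc
  omega

theorem pvSLt_conn (prices : List Int) {a b : Int} (hne : a ≠ b)
    (h : pvSLt prices a b = false) : pvSLt prices b a = true := by
  have h' : ¬ pvSLt prices a b = true := by simp [h]
  simp only [pvSLt, Bool.or_eq_true, Bool.and_eq_true, Bool.not_eq_eq_eq_not, Bool.not_true,
    decide_eq_true_eq, decide_eq_false_iff_not, not_or, not_and, not_lt] at h' ⊢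
  omega

-- sorted2 with second key j ↦ j IS insertion by pvSLt
theorem pvSorted2_def (prices : List Int) (xs : List Int) :
    PySem.List.sorted2 xs (fun j => PySem.List.pyGetD prices j 0) (fun j => j) false
      = xs.foldl (fun acc x => PySem.List.insertBy (fun a b => pvSLt prices a b) x acc) [] := rfl

-- inserting preserves being ordered by pvSLt
theorem pvInsertBy_pairwise (prices : List Int) (x : Int) (ys : List Int)
    (h : ys.Pairwise (fun a b => pvSLt prices b a = false)) :
    (PySem.List.insertBy (fun a b => pvSLt prices a b) x ys).Pairwise (fun a b => pvSLt prices b a = false) := by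
  induction ys with
  | nil => simp [PySem.List.insertBy]
  | cons y t ih =>
    rw [List.pairwise_cons] at h
    obtain ⟨hy, ht⟩ := h
    simp only [PySem.List.insertBy]
    by_cases hxy : pvSLt prices x y = true
    · rw [if_pos hxy]
      refine List.Pairwise.cons ?_ (List.Pairwise.cons hy ht)
      intro z hz
      rcases List.mem_cons.mp hz with rfl | hzt
      · exact pvSLt_asymm prices hxy
      · by_cases hzx : pvSLt prices z x = true
        · have := pvSLt_trans prices hzx hxy
          rw [hy z hzt] at this; exact absurd this (by simp)
        · simpa using hzx
    · rw [if_neg hxy]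
      refine List.Pairwise.cons ?_ (ih ht)
      intro z hz
      rcases (PySem.List.mem_insertBy _ _ _ _).mp hz with rfl | hzt
      · simpa using hxy
      · exact hy z hzt

theorem pvSorted2_pairwise (prices : List Int) (xs : List Int) :
    (PySem.List.sorted2 xs (fun j => PySem.List.pyGetD prices j 0) (fun j => j) false).Pairwise
      (fun a b => pvSLt prices b a = false) := by
  rw [pvSorted2_def]
  have main : ∀ (l acc : List Int), acc.Pairwise (fun a b => pvSLt prices b a = false) →
      (l.foldl (fun acc x => PySem.List.insertBy (fun a b => pvSLt prices a b) x acc) acc).Pairwise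
        (fun a b => pvSLt prices b a = false) := by
    intro l
    induction l with
    | nil => intro acc h; exact h
    | cons x t ih =>
      intro acc h
      exact ih _ (pvInsertBy_pairwise prices x acc h)
  exact main xs [] (by simp)

-- the selected slot beats every available slot in the pvSLt order
theorem pvSelMin_isMin (prices : List Int) (rest : List Int) :
    ∀ a z : Int, z ∈ a :: rest → pvSLt prices z (pvSelMin prices a rest) = false := by
  induction rest with
  | nil =>
    intro a z hz
    simp only [List.mem_singleton] at hz
    subst hz
    simp [pvSelMin, pvSLt_irrefl]
  | cons b t ih =>
    intro a z hz
    have hunf : pvSelMin prices a (b :: t) = pvSelMin prices (if pvPairLt prices b a then b else a) t := by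
      simp [pvSelMin]
    set a' := (if pvPairLt prices b a then b else a) with ha'
    rw [hunf]
    have hm : pvSLt prices a' (pvSelMin prices a' t) = false := ih a' a' List.mem_cons_self
    have key : ∀ w : Int, pvSLt prices w a' = false → pvSLt prices w (pvSelMin prices a' t) = false := by
      intro w hw
      by_contra hc
      rw [Bool.not_eq_false] at hc
      by_cases hwa : w = a'
      · rw [hwa] at hc; rw [hc] at hm; exact absurd hm (by simp)
      · have := pvSLt_trans prices (pvSLt_conn prices hwa hw) hc
        rw [this] at hm; exact absurd hm (by simp)
    rcases List.mem_cons.mp hz with hza | hz'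
    · by_cases hba : pvPairLt prices b a = true
      · have haeq : a' = b := by rw [ha', if_pos hba]
        refine key z ?_
        rw [haeq, hza]
        exact pvSLt_asymm prices (by rw [← pvPairLt_eq_pvSLt]; exact hba)
      · have haeq : a' = a := by rw [ha', if_neg hba]
        exact ih a' z (by rw [haeq, hza]; exact List.mem_cons_self)
    · rcases List.mem_cons.mp hz' with hzb | hzt
      · by_cases hba : pvPairLt prices b a = true
        · have haeq : a' = b := by rw [ha', if_pos hba]
          exact ih a' z (by rw [haeq, hzb]; exact List.mem_cons_self)
        · have haeq : a' = a := by rw [ha', if_neg hba]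
          refine key z ?_
          rw [haeq, hzb, ← pvPairLt_eq_pvSLt]
          exact Bool.eq_false_iff.mpr hba
      · exact ih a' z (List.mem_cons_of_mem a' hzt)

-- extracting the selected minimum from the front of the sorted order
theorem pvSorted2_cons_min (prices : List Int) (a : Int) (rest : List Int)
    (hnd : (a :: rest).Nodup) :
    PySem.List.sorted2 (a :: rest) (fun j => PySem.List.pyGetD prices j 0) (fun j => j) false
      = pvSelMin prices a rest ::
        PySem.List.sorted2 ((a :: rest).filter (fun j => j ≠ pvSelMin prices a rest))
          (fun j => PySem.List.pyGetD prices j 0) (fun j => j) false := by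
  set m := pvSelMin prices a rest with hm
  have hmem : m ∈ a :: rest := pvSelMin_mem prices rest a
  have hfilter : (a :: rest).filter (fun j => j ≠ m) = (a :: rest).erase m := by
    rw [hnd.erase_eq_filter]
    refine (List.filter_congr (fun x _ => ?_)).symm
    rw [Bool.eq_iff_iff]
    simp [bne_iff_ne]
  have hperm : (m :: PySem.List.sorted2 ((a :: rest).filter (fun j => j ≠ m))
      (fun j => PySem.List.pyGetD prices j 0) (fun j => j) false).Perm
      (PySem.List.sorted2 (a :: rest) (fun j => PySem.List.pyGetD prices j 0) (fun j => j) false) := by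
    refine List.Perm.trans ?_ (PySem.List.sorted2_perm _ _ _ _).symm
    refine List.Perm.trans (List.Perm.cons m (PySem.List.sorted2_perm _ _ _ _)) ?_
    rw [hfilter]
    exact (List.perm_cons_erase hmem).symm
  have hs1 : (PySem.List.sorted2 (a :: rest) (fun j => PySem.List.pyGetD prices j 0) (fun j => j) false).Pairwise
      (fun x y => pvSLt prices y x = false) := pvSorted2_pairwise prices _
  have hs2 : (m :: PySem.List.sorted2 ((a :: rest).filter (fun j => j ≠ m))
      (fun j => PySem.List.pyGetD prices j 0) (fun j => j) false).Pairwise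
      (fun x y => pvSLt prices y x = false) := by
    refine List.Pairwise.cons ?_ (pvSorted2_pairwise prices _)
    intro z hz
    have hz' : z ∈ (a :: rest).filter (fun j => j ≠ m) :=
      (PySem.List.sorted2_perm _ _ _ _).mem_iff.mp hz
    have hzin : z ∈ a :: rest := List.mem_of_mem_filter hz'
    exact pvSelMin_isMin prices rest a z hzin
  exact List.Perm.eq_of_pairwise
    (fun x y _ _ h1 h2 => by
      by_contra hne
      have := pvSLt_conn prices (Ne.symm hne) h1
      rw [this] at h2; exact absurd h2 (by simp))
    hs1 hs2 hperm.symm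

-- the index-order walk both loops reduce to
def pvWalk (limits : List Int) : List Int → Int → List Int → List Int
  | [], _, res => res
  | i :: rest, rem, res =>
    if rem > 0 then
      if rem > PySem.List.pyGetD limits i 0 then
        pvWalk limits rest (rem - PySem.List.pyGetD limits i 0)
          (PySem.List.pySetD res i (PySem.List.pyGetD limits i 0))
      else PySem.List.pySetD res i rem
    else res

theorem pvAWhile_eq_walk (limits : List Int) (f : Int → Int) :
    ∀ (order : List Int) (rem : Int) (res : List Int),
    pvAWhile limits (order.map (fun i => (f i, i))) rem res = pvWalk limits order rem res := by
  intro order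
  induction order with
  | nil => intro rem res; rfl
  | cons i rest ih =>
    intro rem res
    simp only [List.map_cons, pvAWhile, pvWalk]
    rw [ih]

theorem pvSelLoop_nonpos (prices limits : List Int) (avail : List Int) (rem : Int) (res : List Int)
    (h : ¬ rem > 0) : pvSelLoop prices limits avail rem res = res := by
  cases avail <;> simp [pvSelLoop, h]

-- the central bridge: B's selection loop equals the walk along the sorted index order
theorem pvSel_eq_walk (prices limits : List Int) :
    ∀ (n : Nat) (avail : List Int), avail.length ≤ n → avail.Nodup →
    ∀ (rem : Int) (res : List Int),
    pvSelLoop prices limits avail rem res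
      = pvWalk limits (PySem.List.sorted2 avail (fun j => PySem.List.pyGetD prices j 0) (fun j => j) false) rem res := by
  intro n
  induction n with
  | zero =>
    intro avail hlen _ rem res
    have : avail = [] := List.eq_nil_of_length_eq_zero (by omega)
    subst this
    simp [pvSelLoop, pvSorted2_def, pvWalk]
  | succ N ih =>
    intro avail hlen hnd rem res
    cases avail with
    | nil => simp [pvSelLoop, pvSorted2_def, pvWalk]
    | cons a rest =>
      rw [pvSorted2_cons_min prices a rest hnd]
      set m := pvSelMin prices a rest with hm
      by_cases hrem : rem > 0
      · have hmem : m ∈ a :: rest := pvSelMin_mem prices rest a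
        have hflen : ((a :: rest).filter (fun j => j ≠ m)).length < (a :: rest).length :=
          List.length_filter_lt_length_iff_exists.mpr ⟨m, hmem, by simp⟩
        have hfnd : ((a :: rest).filter (fun j => j ≠ m)).Nodup := hnd.filter _
        simp only [pvSelLoop, pvWalk, if_pos hrem]
        by_cases hgt : rem > PySem.List.pyGetD limits m 0
        · rw [if_pos hgt]
          have hmin : min rem (PySem.List.pyGetD limits m 0) = PySem.List.pyGetD limits m 0 := by omega
          rw [hmin]
          exact ih _ (by simp at hflen hlen ⊢; omega) hfnd _ _
        · rw [if_neg hgt]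
          have hmin : min rem (PySem.List.pyGetD limits m 0) = rem := by omega
          rw [hmin]
          rw [show rem - rem = 0 by omega]
          exact pvSelLoop_nonpos prices limits _ 0 _ (by omega)
      · rw [pvSelLoop_nonpos prices limits _ rem res hrem]
        simp [pvWalk, hrem]

-- ===== VERDICT (by name: the statement is the Claim_ definition above) =====
theorem continuousBufferPlanningPrices_spec : Claim_equal_continuousBufferPlanningPrices := by
  intro c pM pLU prices _
  unfold Spec_continuousBufferPlanningPrices continuousBufferPlanningPrices continuousBufferPlanningPrices_alt
  simp only []
  set n := prices.length with hn
  have hlimits :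
      (if pLU.length = n then
        (PySem.List.pyRange 0 n 1).foldl
          (fun pl i => PySem.List.pySetD pl i (min (PySem.List.pyGetD pLU i 0) pM)) (List.replicate n pM)
      else List.replicate n pM)
      = (if pLU.length = n then pLU.map (fun u => min u pM) else List.replicate n pM) := by
    split_ifs with h
    · exact pvLimitsEq pLU pM n h
    · rfl
  -- A's sorted pair list is the sorted index order, mapped through j ↦ (prices[j], j)
  have hpairs :
      (prices.foldl (fun (a : List (Int × Int) × Int) val => (a.1 ++ [(val, a.2)], a.2 + 1)) ([], 0)).1
        = (PySem.List.pyRange 0 n 1).map (fun j => (PySem.List.pyGetD prices j 0, j)) := by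
    rw [pvPairsAux prices [] 0]
    rw [PySem.List.enumerate_eq_map_pyRange prices 0]
    simp [PySem.List.len, List.map_map, Function.comp_def]
    rw [hn]
  have hsorted :
      PySem.List.sorted2
          ((prices.foldl (fun (a : List (Int × Int) × Int) val => (a.1 ++ [(val, a.2)], a.2 + 1)) ([], 0)).1)
          (fun p => p.1) (fun p => p.2) false
        = (PySem.List.sorted2 (PySem.List.pyRange 0 n 1)
            (fun j => PySem.List.pyGetD prices j 0) (fun j => j) false).map
            (fun j => (PySem.List.pyGetD prices j 0, j)) := by
    rw [hpairs]
    exact pvSorted2_map (fun j => (PySem.List.pyGetD prices j 0, j)) (fun p => p.1) (fun p => p.2) _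
  rw [hsorted, hlimits]
  rw [pvAWhile_eq_walk _ (fun j => PySem.List.pyGetD prices j 0)]
  rw [pvSel_eq_walk _ _ n (PySem.List.pyRange 0 n 1)
    (by rw [PySem.List.length_pyRange_one]; omega) (PySem.List.nodup_pyRange_one 0 n) c (List.replicate n 0)]
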